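-- pv_equiv track=rewrite | github.com/FelixWayne0318/AlgVex_ATS | algvex/core/model/walk_forward.py | create_expanding_folds
-- ===== SOURCE A (Python) =====
-- from typing import Any, Dict, List, Optional, Tuple, Union
--
-- def create_expanding_folds(
--     n_samples: int,
--     initial_train_size: int,
--     test_window: int,
--     step_size: int,
-- ) -> List[Tuple[Tuple[int, int], Tuple[int, int]]]:
--     """
--     创建扩展窗口的 folds (训练集不断增大)
--
--     Args:
--         n_samples: 样本总数
--         initial_train_size: 初始训练集大小
--         test_window: 测试窗口大小
--         step_size: 步进大小
--
--     Returns: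
--         [(train_range, test_range), ...]
--     """
--     folds = []
--
--     train_end = initial_train_size
--     while True:
--         test_start = train_end
--         test_end = test_start + test_window
--
--         if test_end > n_samples:
--             break
--
--         folds.append((
--             (0, train_end),  # 训练集从头开始
--             (test_start, test_end),
--         ))
--
--         train_end += step_size
--
--     return folds
-- ===== SOURCE B (Python) =====
-- def create_expanding_folds(
--     n_samples: int,
--     initial_train_size: int,
--     test_window: int,
--     step_size: int,
-- ):
--     if step_size <= 0:
--         raise ValueError("step_size must be positive")
--     count = max(0, (n_samples - test_window - initial_train_size) // step_size + 1)
--     return [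
--         ((0, initial_train_size + i * step_size),
--          (initial_train_size + i * step_size, initial_train_size + i * step_size + test_window))
--         for i in range(count)
--     ]
-- ===== Notes on version B (the rewrite author's own statement) =====
-- stated objective: simpler
-- what changed: The number of folds is computed in closed form (floor division) and the list is built by one comprehension over range(count), replacing A's unbounded while-True loop with a running accumulator and break; B also raises ValueError for step_size <= 0, where A either loops forever or accidentally returns [].
-- outside the precondition, e.g. on create_expanding_folds(0, 1, 0, -1): A returns [], B raises ValueError
import Mathlib
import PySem

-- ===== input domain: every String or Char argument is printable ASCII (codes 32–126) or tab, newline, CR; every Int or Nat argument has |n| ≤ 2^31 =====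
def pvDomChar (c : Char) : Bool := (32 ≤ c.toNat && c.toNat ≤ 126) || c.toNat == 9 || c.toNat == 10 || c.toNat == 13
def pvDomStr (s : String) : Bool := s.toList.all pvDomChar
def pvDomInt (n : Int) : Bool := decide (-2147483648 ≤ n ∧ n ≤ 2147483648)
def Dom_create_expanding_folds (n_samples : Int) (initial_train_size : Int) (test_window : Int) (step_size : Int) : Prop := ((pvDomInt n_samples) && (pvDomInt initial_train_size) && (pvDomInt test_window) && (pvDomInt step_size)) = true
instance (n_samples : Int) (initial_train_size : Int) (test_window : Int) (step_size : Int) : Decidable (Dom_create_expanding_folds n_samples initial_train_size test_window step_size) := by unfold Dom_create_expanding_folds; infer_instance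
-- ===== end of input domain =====

-- ===== PORT A =====
-- B replaces A's while-True/break loop by a closed-form fold count and one comprehension;
-- Pre_ restricts to step_size > 0, the only regime where A's loop is meaningful (B raises ValueError otherwise).
-- A's while-True loop: terminates when test_end > n_samples; for step_size <= 0 with a passing
-- first check Python loops forever, so the port returns the accumulator there (outside Pre_).
def createExpandingLoop (n_samples test_window step_size : Int) (train_end : Int)
    (folds : List ((Int × Int) × (Int × Int))) : List ((Int × Int) × (Int × Int)) :=
  if train_end + test_window > n_samples then folds.reverse
  else if step_size ≤ 0 then folds.reverse  -- Python diverges here; excluded by Pre_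
  else createExpandingLoop n_samples test_window step_size (train_end + step_size)
        (((0, train_end), (train_end, train_end + test_window)) :: folds)
termination_by (n_samples - test_window - train_end + step_size).toNat
decreasing_by omega

def create_expanding_folds (n_samples : Int) (initial_train_size : Int) (test_window : Int) (step_size : Int) : List ((Int × Int) × (Int × Int)) :=
  createExpandingLoop n_samples test_window step_size initial_train_size []

-- ===== PORT B =====
def create_expanding_folds_alt (n_samples : Int) (initial_train_size : Int) (test_window : Int) (step_size : Int) : List ((Int × Int) × (Int × Int)) :=
  if step_size ≤ 0 then []  -- Python B raises ValueError here; excluded by Pre_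
  else
    let count := max 0 (PySem.Int.floordiv (n_samples - test_window - initial_train_size) step_size + 1)
    (List.range count.toNat).map (fun (i : Nat) =>
      ((0, initial_train_size + (i : Int) * step_size),
       (initial_train_size + (i : Int) * step_size,
        initial_train_size + (i : Int) * step_size + test_window)))

-- ===== PRECONDITION & SPEC =====
-- Pre_ excludes step_size <= 0: there A loops forever whenever initial_train_size + test_window <= n_samples,
-- and otherwise returns [] only as an accident of a nonsensical step; B raises ValueError on all such inputs.
def Pre_create_expanding_folds (n_samples : Int) (initial_train_size : Int) (test_window : Int) (step_size : Int) : Prop :=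
  0 < step_size
instance (n_samples : Int) (initial_train_size : Int) (test_window : Int) (step_size : Int) : Decidable (Pre_create_expanding_folds n_samples initial_train_size test_window step_size) := by unfold Pre_create_expanding_folds; infer_instance
def pvWitness_create_expanding_folds : Int × Int × Int × Int := (10, 4, 2, 2)

def Spec_create_expanding_folds (n_samples : Int) (initial_train_size : Int) (test_window : Int) (step_size : Int) (out : List ((Int × Int) × (Int × Int))) : Prop := out = create_expanding_folds_alt n_samples initial_train_size test_window step_size
instance (n_samples : Int) (initial_train_size : Int) (test_window : Int) (step_size : Int) (out : List ((Int × Int) × (Int × Int))) : Decidable (Spec_create_expanding_folds n_samples initial_train_size test_window step_size out) := by unfold Spec_create_expanding_folds; infer_instance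

-- ===== CLAIM (what is proved, stated in full; the proofs are below) =====
def Claim_equal_create_expanding_folds : Prop := ∀ (n_samples : Int) (initial_train_size : Int) (test_window : Int) (step_size : Int), Dom_create_expanding_folds n_samples initial_train_size test_window step_size → Pre_create_expanding_folds n_samples initial_train_size test_window step_size → Spec_create_expanding_folds n_samples initial_train_size test_window step_size (create_expanding_folds n_samples initial_train_size test_window step_size)

-- ===== LEMMAS AND PROOFS =====
lemma createExpandingLoop_eq (n_samples test_window step_size : Int) (hstep : 0 < step_size) :
    ∀ (m : Nat) (train_end : Int) (folds : List ((Int × Int) × (Int × Int))),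
    (n_samples - test_window - train_end + step_size).toNat ≤ m →
    createExpandingLoop n_samples test_window step_size train_end folds =
      folds.reverse ++ (List.range (max 0 ((n_samples - test_window - train_end) / step_size + 1)).toNat).map
        (fun (i : Nat) => ((0, train_end + (i : Int) * step_size),
                   (train_end + (i : Int) * step_size,
                    train_end + (i : Int) * step_size + test_window))) := by
  intro m
  induction m with
  | zero =>
    intro te folds hm
    have h1 : te + test_window > n_samples := by omega
    have h2 : (n_samples - test_window - te) / step_size < 0 :=
      Int.ediv_neg_of_neg_of_pos (by omega) hstep
    rw [createExpandingLoop]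
    have h0 : max 0 ((n_samples - test_window - te) / step_size + 1) = 0 := by omega
    simp [h1, h0]
  | succ m ih =>
    intro te folds hm
    rw [createExpandingLoop]
    by_cases h1 : te + test_window > n_samples
    · have h2 : (n_samples - test_window - te) / step_size < 0 :=
        Int.ediv_neg_of_neg_of_pos (by omega) hstep
      have h0 : max 0 ((n_samples - test_window - te) / step_size + 1) = 0 := by omega
      simp [h1, h0]
    · have hq : 0 ≤ (n_samples - test_window - te) / step_size :=
        Int.ediv_nonneg (by omega) (le_of_lt hstep)
      have hrec : (n_samples - test_window - (te + step_size)) / step_size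
          = (n_samples - test_window - te) / step_size + (-1) := by
        rw [← Int.add_mul_ediv_right (n_samples - test_window - te) (-1) (ne_of_gt hstep)]
        ring_nf
      simp only [h1, if_false, if_neg (not_le.mpr hstep)]
      rw [ih (te + step_size) _ (by omega)]
      have hc : (max 0 ((n_samples - test_window - te) / step_size + 1)).toNat
          = (max 0 ((n_samples - test_window - (te + step_size)) / step_size + 1)).toNat + 1 := by
        omega
      rw [hc, List.range_succ_eq_map]
      simp only [List.reverse_cons, List.append_assoc, List.cons_append, List.nil_append,
        ]
      simp
      intro a _
      ring

theorem create_expanding_folds_spec : Claim_equal_create_expanding_folds := by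
  intro n it tw st _ hpre
  unfold Spec_create_expanding_folds create_expanding_folds create_expanding_folds_alt
  rw [createExpandingLoop_eq n tw st hpre (n - tw - it + st).toNat it [] le_rfl]
  rw [PySem.Int.floordiv_eq_ediv_of_pos hpre]
  simp [not_le.mpr hpre]
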